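-- pv_equiv track=rewrite | github.com/matyh/Checkio | Scientific_Expedition/calculate_islands.py | checkio2
-- ===== SOURCE A (Python) =====
-- def checkio2(land_map):
--     same_island=lambda l,island:any([(x-l[0])**2+(y-l[1])**2<=2 for x,y in island])
--     sizes=[]
--     lands=[[i,j] for i,row in enumerate(land_map) for j,land in enumerate(row) if land]
--     print (lands)
--     while lands:
--         #still one island
--         island=[lands.pop()]
--         old_size,size=0,1
--         while old_size!=size:
--             old_size=size
--             for i,land in enumerate(lands):
--                 if same_island(land,island):island+=[lands.pop(i)]
--             size=len(island)
--         sizes+=[size]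
--     return sorted(sizes)
-- ===== SOURCE B (Python) =====
-- def checkio2(land_map):
--     lands = [(i, j) for i, row in enumerate(land_map) for j, land in enumerate(row) if land]
--     sizes = []
--     while lands:
--         seed = lands.pop()
--         land_set = set(lands)
--         comp = {seed}
--         stack = [seed]
--         while stack:
--             i, j = stack.pop()
--             for di in (-1, 0, 1):
--                 for dj in (-1, 0, 1):
--                     n = (i + di, j + dj)
--                     if n in land_set:
--                         land_set.remove(n)
--                         comp.add(n)
--                         stack.append(n)
--         sizes.append(len(comp))
--         lands = [c for c in lands if c not in comp]
--     return sorted(sizes)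
-- ===== Notes on version B (the rewrite author's own statement) =====
-- stated objective: faster
-- what changed: Replaces A's quadratic-pass fixpoint (repeatedly rescanning the whole remaining-land list with pop(i) until an island stops growing) by a stack-based flood fill over a hash set of coordinates: each component is collected by DFS probing the 8 neighbours of each cell in O(1) set lookups.
import Mathlib
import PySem

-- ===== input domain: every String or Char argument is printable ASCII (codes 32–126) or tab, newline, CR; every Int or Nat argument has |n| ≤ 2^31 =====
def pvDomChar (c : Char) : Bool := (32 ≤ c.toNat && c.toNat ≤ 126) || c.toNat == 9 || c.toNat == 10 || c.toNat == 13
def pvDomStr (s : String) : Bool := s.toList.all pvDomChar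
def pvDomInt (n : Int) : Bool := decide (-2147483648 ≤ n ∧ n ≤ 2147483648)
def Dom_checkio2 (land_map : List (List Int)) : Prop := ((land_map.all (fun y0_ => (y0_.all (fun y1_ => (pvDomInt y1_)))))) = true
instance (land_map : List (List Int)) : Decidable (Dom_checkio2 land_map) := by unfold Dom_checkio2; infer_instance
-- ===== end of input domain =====

-- B replaces A's repeated whole-list rescans per island by a stack-based flood fill over a set
-- of coordinates (measured faster). Equivalence is about the RETURN value; A additionally
-- prints the land list (an I/O side effect not modelled here).

-- ===== PORT A =====
-- lands is built from [i,j] index pairs, modelled as Int × Int.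
def pvSameIsland (l : Int × Int) (island : List (Int × Int)) : Bool :=
  island.any (fun p => decide ((p.1 - l.1) ^ 2 + (p.2 - l.2) ^ 2 ≤ 2))

-- termination facts for the loop ports (cited by name in decreasing_by)
theorem pvDecPassA2 (lands : List (Int × Int)) (i : Nat) (h : i < lands.length) :
    lands.length - (i + 1) < lands.length - i :=
  Nat.sub_succ_lt_self _ _ h

theorem pvDecPassA1 (lands : List (Int × Int)) (i : Nat) (h : i < lands.length) :
    (lands.eraseIdx i).length - (i + 1) < lands.length - i :=
  Nat.lt_of_le_of_lt (Nat.sub_le_sub_right (List.eraseIdx_sublist lands i).length_le (i + 1))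
    (pvDecPassA2 lands i h)

-- the inner 'for i, land in enumerate(lands): if …: island += [lands.pop(i)]' loop:
-- Python's iterator index advances over the list as it is mutated in place.
def pvPassA (i : Nat) (lands island : List (Int × Int)) :
    List (Int × Int) × List (Int × Int) :=
  if h : i < lands.length then
    if pvSameIsland lands[i] island then
      pvPassA (i + 1) (lands.eraseIdx i) (island ++ [lands[i]])
    else
      pvPassA (i + 1) lands island
  else
    (lands, island)
termination_by lands.length - i
decreasing_by
  · exact pvDecPassA1 lands i h
  · exact pvDecPassA2 lands i h

-- length bookkeeping, needed for the termination of pvGrowA/pvOuterA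
theorem pvPassA_len (i : Nat) (lands island : List (Int × Int)) :
    (pvPassA i lands island).1.length + (pvPassA i lands island).2.length
      = lands.length + island.length
    ∧ island.length ≤ (pvPassA i lands island).2.length := by
  fun_induction pvPassA i lands island with
  | case1 i lands island h hs ih =>
      rw [List.length_eraseIdx_of_lt h, List.length_append, List.length_singleton] at ih
      obtain ⟨ih1, ih2⟩ := ih
      constructor
      · rw [ih1, Nat.add_comm island.length 1, ← Nat.add_assoc,
          Nat.sub_add_cancel (Nat.lt_of_le_of_lt (Nat.zero_le i) h)]
      · exact Nat.le_trans (Nat.le_succ island.length) ih2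
  | case2 i lands island h hs ih => exact ih
  | case3 i lands island h => exact ⟨rfl, Nat.le_refl _⟩

theorem pvDecGrow (lands island : List (Int × Int))
    (h : ¬ (pvPassA 0 lands island).2.length = island.length) :
    (pvPassA 0 lands island).1.length < lands.length := by
  have h2 := (pvPassA_len 0 lands island).1
  have h4 : island.length < (pvPassA 0 lands island).2.length :=
    Nat.lt_of_le_of_ne (pvPassA_len 0 lands island).2 (fun e => h e.symm)
  have h5 := Nat.add_lt_add_left h4 (pvPassA 0 lands island).1.length
  rw [h2] at h5
  exact Nat.lt_of_add_lt_add_right h5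

-- the 'while old_size != size' fixpoint loop of one island
def pvGrowA (lands island : List (Int × Int)) : List (Int × Int) × List (Int × Int) :=
  if (pvPassA 0 lands island).2.length ≠ island.length then
    pvGrowA (pvPassA 0 lands island).1 (pvPassA 0 lands island).2
  else pvPassA 0 lands island
termination_by lands.length
decreasing_by
  rename_i hne
  exact pvDecGrow lands island hne

theorem pvPassA_len_le (lands island : List (Int × Int)) :
    (pvPassA 0 lands island).1.length ≤ lands.length := by
  have h2 := (pvPassA_len 0 lands island).1
  have h5 := Nat.add_le_add_left (pvPassA_len 0 lands island).2
    (pvPassA 0 lands island).1.length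
  rw [h2] at h5
  exact Nat.le_of_add_le_add_right h5

theorem pvGrowA_len_le (lands island : List (Int × Int)) :
    (pvGrowA lands island).1.length ≤ lands.length := by
  fun_induction pvGrowA lands island with
  | case1 lands island h ih =>
      exact Nat.le_trans ih (pvPassA_len_le lands island)
  | case2 lands island h =>
      exact pvPassA_len_le lands island

-- the lands comprehension (shared by both sources verbatim)
def pvLands (land_map : List (List Int)) : List (Int × Int) :=
  (PySem.List.enumerate land_map).flatMap (fun p =>
    ((PySem.List.enumerate p.2).filter (fun q => q.2 ≠ 0)).map (fun q => (p.1, q.1)))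

theorem pvDecOuterA (lands : List (Int × Int)) (h : ¬ lands = []) :
    (pvGrowA lands.dropLast [lands.getLast h]).1.length < lands.length := by
  have h2 : lands.dropLast.length < lands.length := by
    rw [List.length_dropLast]
    exact Nat.sub_lt (List.length_pos_of_ne_nil h) Nat.one_pos
  exact Nat.lt_of_le_of_lt (pvGrowA_len_le lands.dropLast [lands.getLast h]) h2

-- the outer 'while lands' loop; lands.pop() pops the LAST element
def pvOuterA (lands : List (Int × Int)) (sizes : List Int) : List Int :=
  if h : lands = [] then sizes
  else
    pvOuterA (pvGrowA lands.dropLast [lands.getLast h]).1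
      (sizes ++ [((pvGrowA lands.dropLast [lands.getLast h]).2.length : Int)])
termination_by lands.length
decreasing_by
  exact pvDecOuterA lands h

def checkio2 (land_map : List (List Int)) : List Int :=
  PySem.List.sorted (pvOuterA (pvLands land_map) []) (fun x => x) false

-- ===== PORT B =====
-- the 9 probed neighbour coordinates (i+di, j+dj), di,dj ∈ {-1,0,1}
def pvNbrs (c : Int × Int) : List (Int × Int) :=
  [(-1 : Int), 0, 1].flatMap (fun di => [(-1 : Int), 0, 1].map (fun dj => (c.1 + di, c.2 + dj)))

-- body of the double neighbour loop; state = (stack, land_set, comp).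
-- 'land_set.remove(n)' after the membership test equals Set.discard.
def pvStepB (s : List (Int × Int) × List (Int × Int) × List (Int × Int)) (n : Int × Int) :
    List (Int × Int) × List (Int × Int) × List (Int × Int) :=
  if PySem.Set.contains s.2.1 n then
    (s.1 ++ [n], PySem.Set.discard s.2.1 n, PySem.Set.add s.2.2 n)
  else s

theorem pvVisit_le (ns : List (Int × Int)) (st ls comp : List (Int × Int)) :
    (ns.foldl pvStepB (st, ls, comp)).2.1.length ≤ ls.length := by
  induction ns generalizing st ls comp with
  | nil => exact Nat.le_refl _
  | cons n ns ih =>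
      rw [List.foldl_cons]
      unfold pvStepB
      split
      · exact Nat.le_trans (ih _ _ _) (List.length_filter_le _ _)
      · exact ih _ _ _

theorem pvVisit_dec (ns : List (Int × Int)) (st ls comp : List (Int × Int)) :
    (ns.foldl pvStepB (st, ls, comp)).2.1.length < ls.length
      ∨ ns.foldl pvStepB (st, ls, comp) = (st, ls, comp) := by
  induction ns generalizing st ls comp with
  | nil => exact Or.inr rfl
  | cons n ns ih =>
      rw [List.foldl_cons]
      unfold pvStepB
      split
      · left
        refine Nat.lt_of_le_of_lt (pvVisit_le _ _ _ _) ?_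
        rename_i hc
        have hn : n ∈ ls := (PySem.Set.contains_iff _ _).mp hc
        refine List.length_filter_lt_length_iff_exists.mpr ⟨n, hn, ?_⟩
        rw [beq_self_eq_true]
        exact Bool.not_true ▸ (by exact Bool.false_ne_true)
      · exact ih _ _ _

theorem pvDecDfs (stack ls comp : List (Int × Int)) (h : ¬ stack = []) :
    Prod.Lex (· < ·) (· < ·)
      (((pvNbrs (stack.getLast h)).foldl pvStepB (stack.dropLast, ls, comp)).2.1.length,
       ((pvNbrs (stack.getLast h)).foldl pvStepB (stack.dropLast, ls, comp)).1.length)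
      (ls.length, stack.length) := by
  rcases pvVisit_dec (pvNbrs (stack.getLast h)) stack.dropLast ls comp with hlt | heq
  · exact Prod.Lex.left _ _ hlt
  · rw [heq]
    refine Prod.Lex.right _ ?_
    rw [List.length_dropLast]
    exact Nat.sub_lt (List.length_pos_of_ne_nil h) Nat.one_pos

-- the 'while stack' DFS loop; stack.pop() pops the LAST element
def pvDfs (stack ls comp : List (Int × Int)) : List (Int × Int) × List (Int × Int) :=
  if h : stack = [] then (comp, ls)
  else
    let c := stack.getLast h
    let r := (pvNbrs c).foldl pvStepB (stack.dropLast, ls, comp)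
    pvDfs r.1 r.2.1 r.2.2
termination_by (ls.length, stack.length)
decreasing_by
  exact pvDecDfs stack ls comp h

theorem pvDecOuterB (lands : List (Int × Int)) (h : ¬ lands = []) :
    (lands.dropLast.filter (fun c => !(PySem.Set.contains (pvDfs [lands.getLast h]
      (PySem.Set.ofList lands.dropLast) (PySem.Set.ofList [lands.getLast h])).1 c))).length
      < lands.length := by
  have h2 : lands.dropLast.length < lands.length := by
    rw [List.length_dropLast]
    exact Nat.sub_lt (List.length_pos_of_ne_nil h) Nat.one_pos
  exact Nat.lt_of_le_of_lt (List.length_filter_le _ _) h2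

def pvOuterB (lands : List (Int × Int)) (sizes : List Int) : List Int :=
  if h : lands = [] then sizes
  else
    let seed := lands.getLast h
    let r := pvDfs [seed] (PySem.Set.ofList lands.dropLast) (PySem.Set.ofList [seed])
    pvOuterB (lands.dropLast.filter (fun c => !(PySem.Set.contains r.1 c)))
             (sizes ++ [PySem.Set.len r.1])
termination_by lands.length
decreasing_by
  exact pvDecOuterB lands h

def checkio2_alt (land_map : List (List Int)) : List Int :=
  PySem.List.sorted (pvOuterB (pvLands land_map) []) (fun x => x) false

-- ===== PRECONDITION & SPEC =====
def Spec_checkio2 (land_map : List (List Int)) (out : List Int) : Prop := out = checkio2_alt land_map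
instance (land_map : List (List Int)) (out : List Int) : Decidable (Spec_checkio2 land_map out) := by unfold Spec_checkio2; infer_instance

-- ===== CLAIM (what is proved, stated in full; the proofs are below) =====
def Claim_equal_checkio2 : Prop := ∀ (land_map : List (List Int)), Dom_checkio2 land_map → Spec_checkio2 land_map (checkio2 land_map)

-- ===== LEMMAS AND PROOFS =====

-- 8-adjacency (squared distance ≤ 2)
def pvAdj (x y : Int × Int) : Prop := (y.1 - x.1) ^ 2 + (y.2 - x.2) ^ 2 ≤ 2

theorem pvAdj_symm {x y : Int × Int} (h : pvAdj x y) : pvAdj y x := by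
  unfold pvAdj at *; nlinarith [h]

theorem pvSameIsland_iff (l : Int × Int) (I : List (Int × Int)) :
    pvSameIsland l I = true ↔ ∃ p ∈ I, pvAdj l p := by
  simp [pvSameIsland, pvAdj]

theorem mem_pvNbrs (c y : Int × Int) : y ∈ pvNbrs c ↔ pvAdj c y := by
  simp only [pvNbrs, List.mem_flatMap, List.mem_map, pvAdj]
  constructor
  · rintro ⟨di, hdi, dj, hdj, rfl⟩
    simp at hdi hdj
    rcases hdi with rfl | rfl | rfl <;> rcases hdj with rfl | rfl | rfl <;> norm_num
  · intro h
    refine ⟨y.1 - c.1, ?_, y.2 - c.2, ?_, ?_⟩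
    · have h1 : (y.1 - c.1) ^ 2 ≤ 2 := by nlinarith [sq_nonneg (y.2 - c.2)]
      have h2 : -1 ≤ y.1 - c.1 := by nlinarith [sq_nonneg (y.1 - c.1 + 1)]
      have h3 : y.1 - c.1 ≤ 1 := by nlinarith [sq_nonneg (y.1 - c.1 - 1)]
      simp; omega
    · have h1 : (y.2 - c.2) ^ 2 ≤ 2 := by nlinarith [sq_nonneg (y.1 - c.1)]
      have h2 : -1 ≤ y.2 - c.2 := by nlinarith [sq_nonneg (y.2 - c.2 + 1)]
      have h3 : y.2 - c.2 ≤ 1 := by nlinarith [sq_nonneg (y.2 - c.2 - 1)]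
      simp; omega
    · ext <;> simp

-- reachability from s through vertices of I
inductive pvReach (s : Int × Int) (I : List (Int × Int)) : Int × Int → Prop
  | refl : pvReach s I s
  | step {x y : Int × Int} : pvReach s I x → y ∈ I → pvAdj x y → pvReach s I y

def pvGood (s : Int × Int) (I : List (Int × Int)) : Prop :=
  s ∈ I ∧ ∀ y ∈ I, pvReach s I y

theorem pvReach_mono {s : Int × Int} {I I' : List (Int × Int)}
    (hsub : ∀ x ∈ I, x ∈ I') {y : Int × Int} (h : pvReach s I y) : pvReach s I' y := by
  induction h with
  | refl => exact pvReach.refl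
  | step _ hy hadj ih => exact pvReach.step ih (hsub _ hy) hadj

theorem pvGood_append {s x : Int × Int} {I : List (Int × Int)}
    (h : pvGood s I) (hx : ∃ y ∈ I, pvAdj y x) : pvGood s (I ++ [x]) := by
  obtain ⟨hs, hr⟩ := h
  obtain ⟨y, hy, hadj⟩ := hx
  have hsub : ∀ z ∈ I, z ∈ I ++ [x] := fun z hz => List.mem_append_left _ hz
  refine ⟨List.mem_append_left _ hs, ?_⟩
  intro z hz
  rcases List.mem_append.mp hz with hz | hz
  · exact pvReach_mono hsub (hr z hz)
  · simp at hz; subst hz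
    exact pvReach.step (pvReach_mono hsub (hr y hy)) (by simp) hadj

theorem pvGood_append_all {s : Int × Int} {I P : List (Int × Int)}
    (h : pvGood s I) (hP : ∀ n ∈ P, ∃ y ∈ I, pvAdj y n) : pvGood s (I ++ P) := by
  induction P generalizing I with
  | nil => simpa using h
  | cons n P ih =>
      have h1 : pvGood s (I ++ [n]) := pvGood_append h (hP n (by simp))
      have h2 : ∀ m ∈ P, ∃ y ∈ I ++ [n], pvAdj y m := by
        intro m hm
        obtain ⟨y, hy, hadj⟩ := hP m (by simp [hm])
        exact ⟨y, List.mem_append_left _ hy, hadj⟩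
      rw [show I ++ n :: P = (I ++ [n]) ++ P by simp]
      exact ih h1 h2

-- the connected component containing s is determined by: s ∈ I, I internally reachable,
-- no adjacency from I into the rest R, and I ∪ R covering the same universe.
theorem pvComp_unique {s : Int × Int} {I₁ R₁ I₂ R₂ : List (Int × Int)}
    (g₁ : pvGood s I₁) (g₂ : pvGood s I₂)
    (n₁ : ∀ x ∈ R₁, ∀ y ∈ I₁, ¬ pvAdj y x) (n₂ : ∀ x ∈ R₂, ∀ y ∈ I₂, ¬ pvAdj y x)
    (cov : ∀ x : Int × Int, (x ∈ I₁ ∨ x ∈ R₁) ↔ (x ∈ I₂ ∨ x ∈ R₂)) :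
    ∀ x : Int × Int, x ∈ I₁ ↔ x ∈ I₂ := by
  have dir : ∀ (Ia Ra Ib Rb : List (Int × Int)), pvGood s Ia → pvGood s Ib →
      (∀ x ∈ Rb, ∀ y ∈ Ib, ¬ pvAdj y x) →
      (∀ x : Int × Int, (x ∈ Ia ∨ x ∈ Ra) → (x ∈ Ib ∨ x ∈ Rb)) →
      ∀ x ∈ Ia, x ∈ Ib := by
    intro Ia Ra Ib Rb ga gb nb cv x hx
    have hr := ga.2 x hx
    clear hx
    induction hr with
    | refl => exact gb.1
    | step hrx hy hadj ih =>
        rcases cv _ (Or.inl hy) with h | h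
        · exact h
        · exact absurd hadj (by simpa using nb _ h _ ih)
  intro x
  constructor
  · exact fun hx => dir I₁ R₁ I₂ R₂ g₁ g₂ n₂ (fun z hz => (cov z).mp hz) x hx
  · exact fun hx => dir I₂ R₂ I₁ R₁ g₂ g₁ n₁ (fun z hz => (cov z).mpr hz) x hx

-- an order-preserving sublist with a membership characterisation IS the filter
theorem pvEq_filter_of_sublist {t L : List (Int × Int)} {p : Int × Int → Bool}
    (hsub : t.Sublist L) (hL : L.Nodup)
    (hmem : ∀ x, x ∈ t ↔ x ∈ L ∧ p x = true) : t = L.filter p := by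
  induction hsub with
  | slnil => simp
  | cons a hsub ih =>
      rename_i t' l'
      have hnl : a ∉ l' := (List.nodup_cons.mp hL).1
      have hpa : ¬ (a ∈ t') := fun ha => hnl (hsub.mem ha)
      have hmem' : ∀ x, x ∈ t' ↔ x ∈ l' ∧ p x = true := by
        intro x
        constructor
        · intro hx
          obtain ⟨hxL, hpx⟩ := (hmem x).mp hx
          rcases List.mem_cons.mp hxL with rfl | hxl
          · exact absurd hx hpa
          · exact ⟨hxl, hpx⟩
        · intro ⟨hxl, hpx⟩
          exact (hmem x).mpr ⟨List.mem_cons_of_mem _ hxl, hpx⟩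
      have hq : ¬ p a = true := fun hpa' => hpa ((hmem a).mpr ⟨List.mem_cons_self, hpa'⟩)
      rw [List.filter_cons_of_neg (by simpa using hq)]
      exact ih (List.nodup_cons.mp hL).2 hmem'
  | cons₂ a hsub ih =>
      rename_i t' l'
      have hnl : a ∉ l' := (List.nodup_cons.mp hL).1
      have hpa : p a = true := ((hmem a).mp List.mem_cons_self).2
      have hmem' : ∀ x, x ∈ t' ↔ x ∈ l' ∧ p x = true := by
        intro x
        constructor
        · intro hx
          exact ⟨hsub.mem hx, ((hmem x).mp (List.mem_cons_of_mem _ hx)).2⟩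
        · intro ⟨hxl, hpx⟩
          rcases List.mem_cons.mp ((hmem x).mpr ⟨List.mem_cons_of_mem _ hxl, hpx⟩) with rfl | h
          · exact absurd hxl hnl
          · exact h
      rw [List.filter_cons_of_pos hpa]
      rw [ih (List.nodup_cons.mp hL).2 hmem']

-- ===== A-side characterisation =====

theorem pvPassA_spec (s : Int × Int) (i : Nat) (L I : List (Int × Int)) :
    (I ++ L).Nodup → pvGood s I →
    ((pvPassA i L I).2 ++ (pvPassA i L I).1).Perm (I ++ L)
    ∧ (pvPassA i L I).1.Sublist L
    ∧ pvGood s (pvPassA i L I).2 := by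
  fun_induction pvPassA i L I with
  | case1 i L I h hs ih =>
      intro hni hg
      have hperm0 : L.Perm (L[i] :: L.eraseIdx i) :=
        (List.getElem_cons_eraseIdx_perm h).symm
      have hperm1 : (I ++ L).Perm (I ++ [L[i]] ++ L.eraseIdx i) := by
        have := List.Perm.append_left I hperm0
        simpa using this
      have hni' : (I ++ [L[i]] ++ L.eraseIdx i).Nodup := hperm1.nodup_iff.mp hni
      have hg' : pvGood s (I ++ [L[i]]) := by
        obtain ⟨p, hp, hadj⟩ := (pvSameIsland_iff _ _).mp hs
        exact pvGood_append hg ⟨p, hp, pvAdj_symm hadj⟩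
      obtain ⟨ihp, ihs, ihg⟩ := ih hni' hg'
      exact ⟨ihp.trans hperm1.symm, ihs.trans (List.eraseIdx_sublist L i), ihg⟩
  | case2 i L I h hs ih =>
      intro hni hg
      exact ih hni hg
  | case3 i L I h =>
      intro hni hg
      exact ⟨List.Perm.refl _, List.Sublist.refl L, hg⟩

theorem pvPassA_fix (i : Nat) (L I : List (Int × Int)) :
    (pvPassA i L I).2.length = I.length →
    pvPassA i L I = (L, I) ∧ ∀ x ∈ L.drop i, pvSameIsland x I = false := by
  fun_induction pvPassA i L I with
  | case1 i L I h hs ih =>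
      intro hlen
      exfalso
      have hm := (pvPassA_len (i + 1) (L.eraseIdx i) (I ++ [L[i]])).2
      simp only [List.length_append, List.length_cons, List.length_nil] at hm
      omega
  | case2 i L I h hs ih =>
      intro hlen
      obtain ⟨heq, hall⟩ := ih hlen
      refine ⟨heq, ?_⟩
      intro x hx
      rw [List.drop_eq_getElem_cons h] at hx
      rcases List.mem_cons.mp hx with rfl | hx
      · simpa using hs
      · exact hall x hx
  | case3 i L I h =>
      intro _
      refine ⟨rfl, ?_⟩
      rw [List.drop_eq_nil_of_le (le_of_not_gt h)]
      simp

theorem pvGrowA_spec (s : Int × Int) (L I : List (Int × Int)) :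
    (I ++ L).Nodup → pvGood s I →
    ((pvGrowA L I).2 ++ (pvGrowA L I).1).Perm (I ++ L)
    ∧ (pvGrowA L I).1.Sublist L
    ∧ pvGood s (pvGrowA L I).2
    ∧ ∀ x ∈ (pvGrowA L I).1, pvSameIsland x (pvGrowA L I).2 = false := by
  fun_induction pvGrowA L I with
  | case1 L I h ih =>
      intro hni hg
      obtain ⟨hp, hsub, hgood⟩ := pvPassA_spec s 0 L I hni hg
      have hni' : ((pvPassA 0 L I).2 ++ (pvPassA 0 L I).1).Nodup := hp.nodup_iff.mpr hni
      obtain ⟨ihp, ihs, ihg, ihf⟩ := ih hni' hgood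
      exact ⟨ihp.trans hp, ihs.trans hsub, ihg, ihf⟩
  | case2 L I h =>
      intro hni hg
      have hlen : (pvPassA 0 L I).2.length = I.length := by omega
      obtain ⟨heq, hall⟩ := pvPassA_fix 0 L I hlen
      rw [heq]
      exact ⟨List.Perm.refl _, List.Sublist.refl L, hg, by simpa using hall⟩

-- ===== B-side characterisation =====

theorem pvPerm_cons_discard {ls : List (Int × Int)} {n : Int × Int}
    (hls : ls.Nodup) (hn : n ∈ ls) : ls.Perm (n :: PySem.Set.discard ls n) := by
  rw [List.perm_ext_iff_of_nodup hls ?_]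
  · intro x
    by_cases hx : x = n <;> simp [PySem.Set.mem_discard, hx, hn]
  · refine List.nodup_cons.mpr ⟨?_, ?_⟩
    · simp [PySem.Set.mem_discard]
    · exact List.Nodup.filter _ hls

theorem pvVisit_spec (ns : List (Int × Int)) (st ls comp : List (Int × Int))
    (hls : ls.Nodup) (hd : ∀ x ∈ ls, x ∉ comp) :
    ∃ P ls',
      ns.foldl pvStepB (st, ls, comp) = (st ++ P, ls', comp ++ P)
      ∧ ls'.Sublist ls
      ∧ (∀ n ∈ P, n ∈ ls ∧ n ∈ ns)
      ∧ (∀ n ∈ ns, n ∉ ls')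
      ∧ ((comp ++ P) ++ ls').Perm (comp ++ ls) := by
  induction ns generalizing st ls comp with
  | nil =>
      exact ⟨[], ls, by simp, List.Sublist.refl ls, by simp, by simp, by simp⟩
  | cons n ns ih =>
      simp only [List.foldl_cons, pvStepB]
      split
      · rename_i hc
        have hn : n ∈ ls := by simpa [PySem.Set.contains_iff] using hc
        have hnc : n ∉ comp := hd n hn
        have hadd : PySem.Set.add comp n = comp ++ [n] := PySem.Set.add_of_not_mem hnc
        have hls' : (PySem.Set.discard ls n).Nodup := List.Nodup.filter _ hls
        have hd' : ∀ x ∈ PySem.Set.discard ls n, x ∉ comp ++ [n] := by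
          intro x hx
          obtain ⟨hxl, hxn⟩ := (PySem.Set.mem_discard _ _ _).mp hx
          simp [hd x hxl, hxn]
        obtain ⟨P, ls', heq, hsub, hPm, hns, hperm⟩ :=
          ih (st ++ [n]) (PySem.Set.discard ls n) (comp ++ [n]) hls' hd'
        have hndisc : n ∉ PySem.Set.discard ls n := by simp [PySem.Set.mem_discard]
        refine ⟨n :: P, ls', ?_, ?_, ?_, ?_, ?_⟩
        · rw [hadd, heq]
          simp
        · exact hsub.trans (List.filter_sublist)
        · intro m hm
          rcases List.mem_cons.mp hm with rfl | hm
          · exact ⟨hn, List.mem_cons_self⟩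
          · obtain ⟨hml, hmn⟩ := hPm m hm
            exact ⟨(List.filter_sublist).mem hml, List.mem_cons_of_mem _ hmn⟩
        · intro m hm
          rcases List.mem_cons.mp hm with rfl | hm
          · exact fun hmem => hndisc (hsub.mem hmem)
          · exact hns m hm
        · have h1 : (comp ++ n :: P) ++ ls' = ((comp ++ [n]) ++ P) ++ ls' := by simp
          rw [h1]
          refine hperm.trans ?_
          have h2 : (comp ++ [n]) ++ PySem.Set.discard ls n
              = comp ++ (n :: PySem.Set.discard ls n) := by simp
          rw [h2]
          exact (List.Perm.append_left comp (pvPerm_cons_discard hls hn)).symm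
      · rename_i hc
        have hn : n ∉ ls := by simpa [PySem.Set.contains_iff] using hc
        obtain ⟨P, ls', heq, hsub, hPm, hns, hperm⟩ := ih st ls comp hls hd
        refine ⟨P, ls', heq, hsub, ?_, ?_, hperm⟩
        · intro m hm
          obtain ⟨hml, hmn⟩ := hPm m hm
          exact ⟨hml, List.mem_cons_of_mem _ hmn⟩
        · intro m hm
          rcases List.mem_cons.mp hm with rfl | hm
          · exact fun hmem => hn (hsub.mem hmem)
          · exact hns m hm

theorem pvDfs_nil (ls comp : List (Int × Int)) : pvDfs [] ls comp = (comp, ls) := by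
  rw [pvDfs]; simp

theorem pvDfs_cons (stack ls comp : List (Int × Int)) (h : stack ≠ []) :
    pvDfs stack ls comp =
      pvDfs ((pvNbrs (stack.getLast h)).foldl pvStepB (stack.dropLast, ls, comp)).1
            ((pvNbrs (stack.getLast h)).foldl pvStepB (stack.dropLast, ls, comp)).2.1
            ((pvNbrs (stack.getLast h)).foldl pvStepB (stack.dropLast, ls, comp)).2.2 := by
  rw [pvDfs]; simp [h]
theorem pvDfs_spec (N : Nat) : ∀ stack ls comp : List (Int × Int),
    ls.length + stack.length ≤ N →
    (comp ++ ls).Nodup →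
    (∀ x ∈ stack, x ∈ comp) → (∀ s' : Int × Int, pvGood s' comp →
    (∀ y ∈ comp, y ∈ stack ∨ ∀ x ∈ ls, ¬ pvAdj y x) →
    ((pvDfs stack ls comp).1 ++ (pvDfs stack ls comp).2).Perm (comp ++ ls)
    ∧ pvGood s' (pvDfs stack ls comp).1
    ∧ ∀ x ∈ (pvDfs stack ls comp).2, ∀ y ∈ (pvDfs stack ls comp).1, ¬ pvAdj y x) := by
  induction N with
  | zero =>
      intro stack ls comp hb hni hst s' hg hinv
      have hstack : stack = [] := List.length_eq_zero_iff.mp (by omega)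
      subst hstack
      rw [pvDfs_nil]
      refine ⟨List.Perm.refl _, hg, ?_⟩
      intro x hx y hy
      rcases hinv y hy with hmem | hsafe
      · simp at hmem
      · exact hsafe x hx
  | succ N ihN =>
      intro stack ls comp hb hni hst s' hg hinv
      by_cases h : stack = []
      · subst h
        rw [pvDfs_nil]
        refine ⟨List.Perm.refl _, hg, ?_⟩
        intro x hx y hy
        rcases hinv y hy with hmem | hsafe
        · simp at hmem
        · exact hsafe x hx
      · rw [pvDfs_cons stack ls comp h]
        obtain ⟨hcomp, hls, hdisj⟩ := List.nodup_append.mp hni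
        have hdls : ∀ x ∈ ls, x ∉ comp := fun x hx hc' => hdisj x hc' x hx rfl
        obtain ⟨P, ls', heq, hsub, hPm, hns, hperm⟩ :=
          pvVisit_spec (pvNbrs (stack.getLast h)) stack.dropLast ls comp hls hdls
        rw [heq]
        have hcm : stack.getLast h ∈ comp := hst _ (List.getLast_mem h)
        have hni' : ((comp ++ P) ++ ls').Nodup := hperm.nodup_iff.mpr hni
        have hlen : P.length + ls'.length = ls.length := by
          have := hperm.length_eq
          simp only [List.length_append] at this
          omega
        have hb' : ls'.length + (stack.dropLast ++ P).length ≤ N := by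
          have h1 : 0 < stack.length := List.length_pos_of_ne_nil h
          simp only [List.length_append, List.length_dropLast]
          omega
        have hst' : ∀ x ∈ stack.dropLast ++ P, x ∈ comp ++ P := by
          intro x hx
          rcases List.mem_append.mp hx with hx | hx
          · exact List.mem_append_left _ (hst x ((List.dropLast_sublist stack).mem hx))
          · exact List.mem_append_right _ hx
        have hg' : pvGood s' (comp ++ P) := by
          refine pvGood_append_all hg ?_
          intro n hn
          exact ⟨stack.getLast h, hcm, (mem_pvNbrs _ n).mp (hPm n hn).2⟩
        have hinv' : ∀ y ∈ comp ++ P,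
            y ∈ stack.dropLast ++ P ∨ ∀ x ∈ ls', ¬ pvAdj y x := by
          intro y hy
          rcases List.mem_append.mp hy with hy | hy
          · rcases hinv y hy with hmem | hsafe
            · rw [← List.dropLast_concat_getLast h] at hmem
              rcases List.mem_append.mp hmem with hmem | hmem
              · exact Or.inl (List.mem_append_left _ hmem)
              · simp only [List.mem_singleton] at hmem
                subst hmem
                right
                intro x hx hadj
                exact hns x ((mem_pvNbrs _ x).mpr hadj) hx
            · exact Or.inr (fun x hx => hsafe x (hsub.mem hx))
          · exact Or.inl (List.mem_append_right _ hy)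
        obtain ⟨ihp, ihg, ihn⟩ :=
          ihN (stack.dropLast ++ P) ls' (comp ++ P) hb' hni' hst' s' hg' hinv'
        exact ⟨ihp.trans hperm, ihg, ihn⟩

-- ===== outer loops agree =====

theorem pvLands_nodup (land_map : List (List Int)) : (pvLands land_map).Nodup := by
  unfold pvLands
  rw [List.nodup_flatMap]
  constructor
  · intro p _
    have h1 : ((PySem.List.enumerate p.2).filter (fun q => q.2 ≠ 0)).Pairwise
        (fun a b => a.1 < b.1) :=
      List.Pairwise.filter _ (PySem.List.pairwise_lt_enumerate p.2 0)
    have h2 := (List.pairwise_map (f := fun q : Int × Int => (p.1, q.1))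
      (R := fun a b : Int × Int => a ≠ b)).mpr (h1.imp ?_)
    · exact h2
    · intro a b hab
      intro hcontra
      have : a.1 = b.1 := congrArg Prod.snd hcontra
      omega
  · have h0 := PySem.List.pairwise_lt_enumerate land_map 0
    refine h0.imp ?_
    intro p q hpq
    intro a ha hb
    simp only [List.mem_map, List.mem_filter] at ha hb
    obtain ⟨x, _, rfl⟩ := ha
    obtain ⟨y, _, hy⟩ := hb
    injection hy with h3 h4
    omega

theorem pvOuterA_nil (sizes : List Int) : pvOuterA [] sizes = sizes := by
  rw [pvOuterA]; simp

theorem pvOuterA_cons (lands : List (Int × Int)) (sizes : List Int) (h : lands ≠ []) :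
    pvOuterA lands sizes
      = pvOuterA (pvGrowA lands.dropLast [lands.getLast h]).1
          (sizes ++ [((pvGrowA lands.dropLast [lands.getLast h]).2.length : Int)]) := by
  rw [pvOuterA]; simp [h]

theorem pvOuterB_nil (sizes : List Int) : pvOuterB [] sizes = sizes := by
  rw [pvOuterB]; simp

theorem pvOuterB_cons (lands : List (Int × Int)) (sizes : List Int) (h : lands ≠ []) :
    pvOuterB lands sizes
      = pvOuterB (lands.dropLast.filter (fun c =>
            !(PySem.Set.contains (pvDfs [lands.getLast h]
              (PySem.Set.ofList lands.dropLast) (PySem.Set.ofList [lands.getLast h])).1 c)))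
          (sizes ++ [PySem.Set.len (pvDfs [lands.getLast h]
              (PySem.Set.ofList lands.dropLast) (PySem.Set.ofList [lands.getLast h])).1]) := by
  rw [pvOuterB]; simp [h]

theorem pvOuter_eq (n : Nat) : ∀ lands : List (Int × Int), lands.length ≤ n →
    lands.Nodup → ∀ sizes : List Int, pvOuterA lands sizes = pvOuterB lands sizes := by
  induction n with
  | zero =>
      intro lands hb _ sizes
      have h : lands = [] := List.length_eq_zero_iff.mp (by omega)
      subst h
      rw [pvOuterA_nil, pvOuterB_nil]
  | succ n ih =>
      intro lands hb hnd sizes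
      by_cases h : lands = []
      · subst h
        rw [pvOuterA_nil, pvOuterB_nil]
      · have hsplit : lands.dropLast ++ [lands.getLast h] = lands :=
          List.dropLast_concat_getLast h
        have hndr : (lands.dropLast ++ [lands.getLast h]).Nodup := by rw [hsplit]; exact hnd
        obtain ⟨hrestnd, _, hdisj⟩ := List.nodup_append.mp hndr
        have hniA : ([lands.getLast h] ++ lands.dropLast).Nodup :=
          List.perm_append_comm.nodup_iff.mp hndr
        have hgA : pvGood (lands.getLast h) [lands.getLast h] := by
          refine ⟨List.mem_singleton.mpr rfl, ?_⟩
          intro y hy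
          rw [List.mem_singleton.mp hy]
          exact pvReach.refl
        obtain ⟨hpermA, hsubA, hgoodA, hfixA⟩ :=
          pvGrowA_spec (lands.getLast h) lands.dropLast [lands.getLast h] hniA hgA
        have hofl1 : PySem.Set.ofList lands.dropLast = lands.dropLast :=
          PySem.Set.ofList_eq_self_of_nodup _ hrestnd
        have hofl2 : PySem.Set.ofList [lands.getLast h] = [lands.getLast h] :=
          PySem.Set.ofList_eq_self_of_nodup _ (List.nodup_singleton _)
        obtain ⟨hpermB, hgoodB, hnadjB⟩ :=
          pvDfs_spec (lands.dropLast.length + 1) [lands.getLast h] lands.dropLast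
            [lands.getLast h] (by simp) hniA (fun x hx => hx) (lands.getLast h) hgA
            (fun y hy => Or.inl hy)
        have hnA : ∀ x ∈ (pvGrowA lands.dropLast [lands.getLast h]).1,
            ∀ y ∈ (pvGrowA lands.dropLast [lands.getLast h]).2, ¬ pvAdj y x := by
          intro x hx y hy hadj
          have hfalse := hfixA x hx
          have : pvSameIsland x (pvGrowA lands.dropLast [lands.getLast h]).2 = true :=
            (pvSameIsland_iff _ _).mpr ⟨y, hy, pvAdj_symm hadj⟩
          rw [hfalse] at this
          exact Bool.false_ne_true this
        have hcov : ∀ x : Int × Int,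
            (x ∈ (pvGrowA lands.dropLast [lands.getLast h]).2
              ∨ x ∈ (pvGrowA lands.dropLast [lands.getLast h]).1)
            ↔ (x ∈ (pvDfs [lands.getLast h] lands.dropLast [lands.getLast h]).1
              ∨ x ∈ (pvDfs [lands.getLast h] lands.dropLast [lands.getLast h]).2) := by
          intro x
          rw [← List.mem_append, ← List.mem_append, hpermA.mem_iff, hpermB.mem_iff]
        have hmem := pvComp_unique hgoodA hgoodB hnA hnadjB hcov
        have hndA : (pvGrowA lands.dropLast [lands.getLast h]).2.Nodup :=
          (List.nodup_append.mp (hpermA.nodup_iff.mpr hniA)).1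
        have hndB : (pvDfs [lands.getLast h] lands.dropLast [lands.getLast h]).1.Nodup :=
          (List.nodup_append.mp (hpermB.nodup_iff.mpr hniA)).1
        have hdisjA : ∀ x ∈ (pvGrowA lands.dropLast [lands.getLast h]).1,
            x ∉ (pvGrowA lands.dropLast [lands.getLast h]).2 := by
          have := (List.nodup_append.mp (hpermA.nodup_iff.mpr hniA)).2.2
          intro x hx hx2
          exact this x hx2 x hx rfl
        have hlen : (pvGrowA lands.dropLast [lands.getLast h]).2.length
            = (pvDfs [lands.getLast h] lands.dropLast [lands.getLast h]).1.length :=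
          ((List.perm_ext_iff_of_nodup hndA hndB).mpr hmem).length_eq
        have hfil : (pvGrowA lands.dropLast [lands.getLast h]).1
            = lands.dropLast.filter (fun c =>
                !(PySem.Set.contains (pvDfs [lands.getLast h] lands.dropLast
                  [lands.getLast h]).1 c)) := by
          refine pvEq_filter_of_sublist hsubA hrestnd ?_
          intro x
          constructor
          · intro hx
            refine ⟨hsubA.mem hx, ?_⟩
            have hx2 : x ∉ (pvDfs [lands.getLast h] lands.dropLast [lands.getLast h]).1 :=
              fun hc => hdisjA x hx ((hmem x).mpr hc)
            simp [hx2]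
          · intro ⟨hxr, hxc⟩
            have hx2 : x ∉ (pvDfs [lands.getLast h] lands.dropLast [lands.getLast h]).1 := by
              simpa [PySem.Set.contains_iff] using hxc
            have hx3 : x ∉ (pvGrowA lands.dropLast [lands.getLast h]).2 :=
              fun hc => hx2 ((hmem x).mp hc)
            have hx4 : x ∈ (pvGrowA lands.dropLast [lands.getLast h]).2
                ++ (pvGrowA lands.dropLast [lands.getLast h]).1 :=
              hpermA.mem_iff.mpr (List.mem_append_right _ hxr)
            rcases List.mem_append.mp hx4 with hx5 | hx5
            · exact absurd hx5 hx3
            · exact hx5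
        rw [pvOuterA_cons lands sizes h, pvOuterB_cons lands sizes h, hofl1, hofl2]
        have hlenle : (pvGrowA lands.dropLast [lands.getLast h]).1.length ≤ n := by
          have h1 := hsubA.length_le
          have h2 : 0 < lands.length := List.length_pos_of_ne_nil h
          simp only [List.length_dropLast] at h1
          omega
        rw [ih _ hlenle (hsubA.nodup hrestnd) _]
        rw [hfil, show PySem.Set.len (pvDfs [lands.getLast h] lands.dropLast
          [lands.getLast h]).1 = ((pvDfs [lands.getLast h] lands.dropLast
          [lands.getLast h]).1.length : Int) from rfl, hlen]

-- ===== VERDICT (by name: the statement is the Claim_ definition above) =====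
theorem checkio2_spec : Claim_equal_checkio2 := by
  intro land_map _
  unfold Spec_checkio2 checkio2 checkio2_alt
  rw [pvOuter_eq (pvLands land_map).length _ le_rfl (pvLands_nodup land_map)]
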